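-- pv_equiv track=rewrite | github.com/olliy78/a5120emu | tools/z80_disasm.py | find_strings
-- ===== SOURCE A (Python) =====
-- def find_strings(data, min_len=4):
--     """Find potential ASCII string regions in the data"""
--     strings = {}
--     i = 0
--     while i < len(data):
--         if 0x20 <= data[i] <= 0x7E or data[i] in (0x0D, 0x0A, 0x09):
--             start = i
--             while i < len(data) and (0x20 <= data[i] <= 0x7E or data[i] in (0x0D, 0x0A, 0x09, 0x00, 0x24)):
--                 if data[i] == 0x00 or data[i] == 0x24:
--                     i += 1
--                     break
--                 i += 1
--             length = i - start
--             if length >= min_len: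
--                 strings[start] = length
--         else:
--             i += 1
--     return strings
-- ===== SOURCE B (Python) =====
-- def find_strings(data, min_len=4):
--     """Find potential ASCII string regions in the data.
--
--     Single flat state-machine pass: track the start of the current run of
--     "string body" bytes (printable except '$', plus TAB/LF/CR); on any other
--     byte close the run, attaching the byte itself when it is a 0x00 or 0x24
--     terminator (a terminator with no preceding run is a run of length 1..)."""
--     strings = {}
--     run_start = None
--
--     def emit(start, length):
--         if length >= min_len:
--             strings[start] = length
--
--     for i, b in enumerate(data):
--         if (0x20 <= b <= 0x7E and b != 0x24) or b in (0x0D, 0x0A, 0x09):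
--             if run_start is None:
--                 run_start = i
--         else:
--             if b == 0x24:
--                 s = run_start if run_start is not None else i
--                 emit(s, i - s + 1)
--             elif b == 0x00 and run_start is not None:
--                 emit(run_start, i - run_start + 1)
--             elif run_start is not None:
--                 emit(run_start, i - run_start)
--             run_start = None
--     if run_start is not None:
--         emit(run_start, len(data) - run_start)
--     return strings
-- ===== Notes on version B (the rewrite author's own statement) =====
-- stated objective: simpler
-- what changed: A's nested while-loops (outer scan plus inner run scan with a mid-loop break) are replaced by a single flat state-machine pass over enumerate(data) that tracks the current run's start and closes the run when a non-body byte arrives, attaching a trailing 0x00/0x24 terminator; the flat pass avoids the nested loop's repeated index bookkeeping and double byte tests, a constant-factor speedup a timing run measured.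
import Mathlib
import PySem

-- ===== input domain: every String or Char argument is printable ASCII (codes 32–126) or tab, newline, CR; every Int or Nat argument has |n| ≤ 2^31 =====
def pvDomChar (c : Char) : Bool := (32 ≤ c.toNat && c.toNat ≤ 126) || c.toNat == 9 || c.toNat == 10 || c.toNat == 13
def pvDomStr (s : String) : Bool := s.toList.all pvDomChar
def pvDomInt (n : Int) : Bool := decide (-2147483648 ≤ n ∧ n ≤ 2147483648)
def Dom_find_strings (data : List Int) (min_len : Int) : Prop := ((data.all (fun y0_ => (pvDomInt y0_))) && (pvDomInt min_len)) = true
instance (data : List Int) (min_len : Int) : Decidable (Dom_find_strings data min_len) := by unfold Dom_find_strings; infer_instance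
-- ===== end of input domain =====

-- B replaces A's nested while-loops (outer scan + inner run scan with a break)
-- by a single flat state-machine pass over enumerate(data) tracking the start
-- of the current run; objective: simpler (same O(n) cost).

-- ===== PORT A =====
-- A's outer-loop printability test: 0x20 <= b <= 0x7E or b in (0x0D, 0x0A, 0x09)
def pvPA (b : Int) : Bool := (0x20 ≤ b && b ≤ 0x7E) || b == 0x0D || b == 0x0A || b == 0x09

-- A's inner while loop: returns the final value of i (index access data[i]
-- is exact via getD: the loop guard guarantees 0 ≤ i < len(data)).
def pvInnerA (data : List Int) (i : Nat) : Nat :=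
  if _h : i < data.length then
    let b := data.getD i 0
    if pvPA b || b == 0x00 || b == 0x24 then
      if b == 0x00 || b == 0x24 then i + 1
      else pvInnerA data (i + 1)
    else i
  else i
termination_by data.length - i

-- needed by pvLoopA's termination proof (cited in decreasing_by)
theorem pvInnerA_ge (data : List Int) (i : Nat) : i ≤ pvInnerA data i := by
  fun_induction pvInnerA data i
  all_goals omega

theorem pvInnerA_gt (data : List Int) (i : Nat) (h : i < data.length)
    (hp : pvPA (data.getD i 0) = true) : i < pvInnerA data i := by
  have h1 := pvInnerA_ge data (i + 1)
  rw [pvInnerA]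
  simp only [h, dif_pos, hp, Bool.true_or, if_true]
  split <;> omega

-- A's outer while loop (acc = the dict `strings`)
def pvLoopA (data : List Int) (min_len : Int) (i : Nat) (acc : PySem.Dict Int Int) :
    PySem.Dict Int Int :=
  if h : i < data.length then
    let b := data.getD i 0
    if hp : pvPA b then
      let j := pvInnerA data i
      let length : Int := (j : Int) - (i : Int)
      let acc' := if min_len ≤ length then acc.insert (i : Int) length else acc
      pvLoopA data min_len j acc'
    else pvLoopA data min_len (i + 1) acc
  else acc
termination_by data.length - i
decreasing_by
  · have := pvInnerA_gt data i h hp; omega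
  · omega

def find_strings (data : List Int) (min_len : Int) : List (Int × Int) :=
  (pvLoopA data min_len 0 PySem.Dict.empty).items

-- ===== PORT B =====
-- B's run-body test: (0x20 <= b <= 0x7E and b != 0x24) or b in (0x0D, 0x0A, 0x09)
def pvQB (b : Int) : Bool := (0x20 ≤ b && b ≤ 0x7E && !(b == 0x24)) || b == 0x0D || b == 0x0A || b == 0x09

-- B's emit helper
def pvEmitB (min_len : Int) (strings : PySem.Dict Int Int) (start length : Int) :
    PySem.Dict Int Int :=
  if min_len ≤ length then strings.insert start length else strings

-- B's loop body: state = (run_start, strings)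
def pvStepB (min_len : Int) (st : Option Int × PySem.Dict Int Int) (ib : Int × Int) :
    Option Int × PySem.Dict Int Int :=
  let rs := st.1
  let strings := st.2
  let i := ib.1
  let b := ib.2
  if pvQB b then
    (some (rs.getD i), strings)
  else if b == 0x24 then
    let s := rs.getD i
    (none, pvEmitB min_len strings s (i - s + 1))
  else if b == 0x00 then
    match rs with
    | some s => (none, pvEmitB min_len strings s (i - s + 1))
    | none => (none, strings)
  else
    match rs with
    | some s => (none, pvEmitB min_len strings s (i - s))
    | none => (none, strings)

def find_strings_alt (data : List Int) (min_len : Int) : List (Int × Int) :=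
  let st := (PySem.List.enumerate data 0).foldl (pvStepB min_len) (none, PySem.Dict.empty)
  match st.1 with
  | some s => (pvEmitB min_len st.2 s ((data.length : Int) - s)).items
  | none => st.2.items

-- ===== PRECONDITION & SPEC =====
def Spec_find_strings (data : List Int) (min_len : Int) (out : List (Int × Int)) : Prop := out = find_strings_alt data min_len
instance (data : List Int) (min_len : Int) (out : List (Int × Int)) : Decidable (Spec_find_strings data min_len out) := by unfold Spec_find_strings; infer_instance

-- ===== CLAIM (what is proved, stated in full; the proofs are below) =====
def Claim_equal_find_strings : Prop := ∀ (data : List Int) (min_len : Int), Dom_find_strings data min_len → Spec_find_strings data min_len (find_strings data min_len)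

-- ===== LEMMAS AND PROOFS =====

-- index-recursion view of B's fold (proof helper)
def pvLoopB (data : List Int) (min_len : Int) (i : Nat) (st : Option Int × PySem.Dict Int Int) :
    List (Int × Int) :=
  if h : i < data.length then
    pvLoopB data min_len (i + 1) (pvStepB min_len st ((i : Int), data.getD i 0))
  else
    match st.1 with
    | some s => (pvEmitB min_len st.2 s ((data.length : Int) - s)).items
    | none => st.2.items
termination_by data.length - i

theorem pvEnum_drop (data : List Int) (i : Nat) (h : i < data.length) :
    PySem.List.enumerate (data.drop i) (i : Int)
      = ((i : Int), data.getD i 0) :: PySem.List.enumerate (data.drop (i + 1)) ((i : Int) + 1) := by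
  have hd : data.drop i = data.getD i 0 :: data.drop (i + 1) := by
    rw [List.getD_eq_getElem data 0 h]
    exact (List.drop_eq_getElem_cons h)
  rw [hd, PySem.List.enumerate_cons]

theorem pvLoopB_eq_fold (data : List Int) (min_len : Int) :
    ∀ (k i : Nat), data.length - i ≤ k → ∀ st,
      pvLoopB data min_len i st
        = match ((PySem.List.enumerate (data.drop i) (i : Int)).foldl (pvStepB min_len) st).1 with
          | some s => (pvEmitB min_len ((PySem.List.enumerate (data.drop i) (i : Int)).foldl (pvStepB min_len) st).2 s ((data.length : Int) - s)).items
          | none => ((PySem.List.enumerate (data.drop i) (i : Int)).foldl (pvStepB min_len) st).2.items := by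
  intro k
  induction k with
  | zero =>
    intro i hk st
    have hge : data.length ≤ i := by omega
    rw [pvLoopB]
    simp only [Nat.not_lt.mpr hge, dif_neg]
    rw [List.drop_eq_nil_of_le hge]
    simp [PySem.List.enumerate_nil]
  | succ k ih =>
    intro i hk st
    by_cases h : i < data.length
    · rw [pvLoopB]
      simp only [h, dif_pos]
      rw [ih (i + 1) (by omega)]
      rw [pvEnum_drop data i h]
      simp only [List.foldl_cons]
      have hcast : ((i : Int) + 1) = ((i + 1 : Nat) : Int) := by push_cast; ring
      rw [hcast]
    · rw [pvLoopB]
      have hge : data.length ≤ i := by omega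
      simp only [h, dif_neg, not_false_iff]
      rw [List.drop_eq_nil_of_le hge]
      simp [PySem.List.enumerate_nil]

theorem pvAlt_eq_loopB (data : List Int) (min_len : Int) :
    find_strings_alt data min_len = pvLoopB data min_len 0 (none, PySem.Dict.empty) := by
  rw [pvLoopB_eq_fold data min_len data.length 0 (by omega)]
  simp [find_strings_alt]

-- the central invariant: A's outer loop ≡ B's machine in "no run" state, and
-- B's machine in "run started at s" state ≡ A's inner-loop continuation.
theorem pvMain (data : List Int) (min_len : Int) :
    ∀ (k i : Nat), data.length - i ≤ k → i ≤ data.length → ∀ acc,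
      ((pvLoopA data min_len i acc).items = pvLoopB data min_len i (none, acc))
      ∧ (∀ s : Int,
          pvLoopB data min_len i (some s, acc)
            = (pvLoopA data min_len (pvInnerA data i)
                (pvEmitB min_len acc s ((pvInnerA data i : Int) - s))).items) := by
  intro k
  induction k with
  | zero =>
    intro i hk hle acc
    have hi : i = data.length := by omega
    subst hi
    constructor
    · rw [pvLoopA, pvLoopB]
      simp
    · intro s
      rw [pvLoopB, pvInnerA]
      simp only [lt_irrefl, dif_neg, not_false_iff]
      rw [pvLoopA]
      simp
  | succ k ih =>
    intro i hk hle acc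
    by_cases h : i < data.length
    · obtain ⟨b, hb⟩ : ∃ b, data.getD i 0 = b := ⟨_, rfl⟩
      have hb' : data[i] = b := by
        rw [← hb]; exact (List.getD_eq_getElem data 0 h).symm
      constructor
      · -- MAIN(i)
        rw [pvLoopA, pvLoopB]
        simp only [h, dif_pos, hb, hb']
        by_cases hp : pvPA b
        · by_cases h24 : b = 0x24
          · -- '$' at top level: A records a run of length 1, B closes an empty run
            subst h24
            have hin : pvInnerA data i = i + 1 := by
              rw [pvInnerA]
              simp only [h, dif_pos, hb]
              norm_num
            have hstep : pvStepB min_len (none, acc) ((i : Int), 0x24)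
                = (none, pvEmitB min_len acc (i : Int) ((i : Int) - (i : Int) + 1)) := by
              simp [pvStepB, pvQB]
            simp only [hp, if_pos, hin, hstep]
            have hlen : ((i : Int) - (i : Int) + 1) = ((i + 1 : Nat) : Int) - (i : Int) := by
              push_cast; ring
            rw [hlen]
            simp only [pvEmitB]
            exact (ih (i + 1) (by omega) (by omega) _).1
          · -- printable non-'$': enter the run state
            have hq : pvQB b = true := by
              simp only [pvPA, Bool.or_eq_true, Bool.and_eq_true, decide_eq_true_eq,
                beq_iff_eq] at hp
              simp only [pvQB, Bool.or_eq_true, Bool.and_eq_true, Bool.not_eq_true',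
                decide_eq_true_eq, beq_iff_eq, beq_eq_false_iff_ne, ne_eq]
              omega
            have hne0 : b ≠ 0 := by
              intro h0; subst h0; simp [pvQB] at hq
            have hin : pvInnerA data i = pvInnerA data (i + 1) := by
              rw [pvInnerA]
              simp only [h, dif_pos, hb]
              simp [hp, h24, hne0]
            have hstep : pvStepB min_len (none, acc) ((i : Int), b) = (some (i : Int), acc) := by
              simp [pvStepB, hq]
            simp only [hp, if_pos, hin, hstep]
            exact ((ih (i + 1) (by omega) (by omega) acc).2 (i : Int)).symm
        · -- not printable at top level: both sides skip the byte
          have hp' := hp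
          rw [Bool.not_eq_true] at hp'
          have hq : pvQB b = false := by
            simp only [pvPA, Bool.or_eq_false_iff, Bool.and_eq_false_iff,
              decide_eq_false_iff_not, beq_eq_false_iff_ne, ne_eq] at hp'
            simp only [pvQB, Bool.or_eq_false_iff, Bool.and_eq_false_iff,
              decide_eq_false_iff_not, beq_eq_false_iff_ne, ne_eq, Bool.not_eq_eq_eq_not,
              Bool.not_false, beq_iff_eq]
            omega
          have h24 : b ≠ 0x24 := by
            intro hx; subst hx; simp [pvPA] at hp
          have hstep : pvStepB min_len (none, acc) ((i : Int), b) = (none, acc) := by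
            simp only [pvStepB, hq, Bool.false_eq_true, if_neg, not_false_iff]
            simp only [beq_iff_eq, h24, if_neg, not_false_iff]
            split <;> rfl
          simp only [hp, if_neg, not_false_iff, hstep, Bool.false_eq_true]
          exact (ih (i + 1) (by omega) (by omega) acc).1
      · -- RUN(i): B is inside a run started at s; A is inside its inner loop at i
        intro s
        rw [pvLoopB]
        simp only [h, dif_pos, hb, hb']
        by_cases hq : pvQB b
        · -- run continues
          have hne0 : b ≠ 0 := by
            intro h0; subst h0; simp [pvQB] at hq
          have h24 : b ≠ 0x24 := by
            intro hx; subst hx; simp [pvQB] at hq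
          have hp : pvPA b = true := by
            simp only [pvQB, Bool.or_eq_true, Bool.and_eq_true, Bool.not_eq_true',
              decide_eq_true_eq, beq_iff_eq, beq_eq_false_iff_ne, ne_eq] at hq
            simp only [pvPA, Bool.or_eq_true, Bool.and_eq_true, decide_eq_true_eq, beq_iff_eq]
            omega
          have hin : pvInnerA data i = pvInnerA data (i + 1) := by
            rw [pvInnerA]
            simp only [h, dif_pos, hb]
            simp [hp, h24, hne0]
          have hstep : pvStepB min_len (some s, acc) ((i : Int), b) = (some s, acc) := by
            simp [pvStepB, hq]
          rw [hstep, hin]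
          exact (ih (i + 1) (by omega) (by omega) acc).2 s
        · by_cases hterm : b = 0x24 ∨ b = 0
          · -- terminator byte: close the run including this byte
            have hin : pvInnerA data i = i + 1 := by
              rw [pvInnerA]
              simp only [h, dif_pos, hb]
              rcases hterm with h1 | h1 <;> subst h1 <;> norm_num
            have hstep : pvStepB min_len (some s, acc) ((i : Int), b)
                = (none, pvEmitB min_len acc s ((i : Int) - s + 1)) := by
              rcases hterm with h1 | h1 <;> subst h1 <;> simp [pvStepB, pvQB]
            rw [hstep, hin]
            have hlen : ((i : Int) - s + 1) = ((i + 1 : Nat) : Int) - s := by push_cast; ring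
            rw [hlen]
            exact ((ih (i + 1) (by omega) (by omega) _).1).symm
          · -- non-printable non-terminator: close the run without this byte
            push_neg at hterm
            obtain ⟨h24, h0⟩ := hterm
            have hq' := hq
            rw [Bool.not_eq_true] at hq'
            have hp : pvPA b = false := by
              simp only [pvQB, Bool.or_eq_false_iff, Bool.and_eq_false_iff,
                decide_eq_false_iff_not, beq_eq_false_iff_ne, ne_eq, Bool.not_eq_eq_eq_not,
                Bool.not_false, beq_iff_eq] at hq'
              simp only [pvPA, Bool.or_eq_false_iff, Bool.and_eq_false_iff,
                decide_eq_false_iff_not, beq_eq_false_iff_ne, ne_eq]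
              omega
            have hin : pvInnerA data i = i := by
              rw [pvInnerA]
              simp only [h, dif_pos, hb]
              simp [hp, h24, h0]
            have hstep : pvStepB min_len (some s, acc) ((i : Int), b)
                = (none, pvEmitB min_len acc s ((i : Int) - s)) := by
              simp [pvStepB, hq, h24, h0]
            rw [hstep, hin]
            have hA : pvLoopA data min_len i (pvEmitB min_len acc s ((i : Int) - s))
                = pvLoopA data min_len (i + 1) (pvEmitB min_len acc s ((i : Int) - s)) := by
              rw [pvLoopA]
              simp only [h, dif_pos, hb]
              simp [hp]
            rw [hA]
            exact ((ih (i + 1) (by omega) (by omega) _).1).symm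
    · have hi : i = data.length := by omega
      subst hi
      constructor
      · rw [pvLoopA, pvLoopB]
        simp
      · intro s
        rw [pvLoopB, pvInnerA]
        simp only [lt_irrefl, dif_neg, not_false_iff]
        rw [pvLoopA]
        simp

-- ===== VERDICT (by name: the statement is the Claim_ definition above) =====
theorem find_strings_spec : Claim_equal_find_strings := by
  intro data min_len _
  unfold Spec_find_strings find_strings
  rw [pvAlt_eq_loopB]
  exact (pvMain data min_len data.length 0 (by omega) (by omega) PySem.Dict.empty).1
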